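-- pv_equiv track=rewrite | github.com/evgl/ETL-project | prospector/nodes/paragraphs.py | _str_regex
-- ===== SOURCE A (Python) =====
-- def _str_regex(first_token, is_bullet_pattern):
--     """ Return regex pattern strings from the input word. Also
--     return whether it is a bullet or not - not a bullet if the
--     word contains no punctuations.
--
--     Arguments:
--         first_token (str) : Word to get the pattern of regex.
--         is_bullet_pattern (bool) : whether it is a bullet or not.
--
--     Returns:
--         pattern_list (list of str) : List of strings of regex of each word.
--         is_bullet_pattern (bool) : whether it is a bullet or not.
--     """
--     pattern_list = []
--     for char in first_token:
--         if not char.isalnum():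
--             for c in ['\'', '\"', '\\']:
--                 if c == char:
--                     char = '\\' + c
--             pattern_list.append('[' + char + ']')
--             is_bullet_pattern = True
--         elif char.isalnum():
--             if len(pattern_list) == 0 or pattern_list[-1] != '[a-zA-Z0-9가-힣ㅏ-ㅣㄱ-ㅎ\u4e00-\u9fff]+':
--                 pattern_list.append('[a-zA-Z0-9가-힣ㅏ-ㅣㄱ-ㅎ\u4e00-\u9fff]+')
--     return pattern_list, is_bullet_pattern
-- ===== SOURCE B (Python) =====
-- from itertools import groupby
--
-- _ALNUM_TOKEN = '[a-zA-Z0-9가-힣ㅏ-ㅣㄱ-ㅎ\u4e00-\u9fff]+'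
--
--
-- def _str_regex(first_token, is_bullet_pattern):
--     """groupby-based rewrite: one token per maximal alnum run, one
--     bracketed (escaped) class per non-alnum char."""
--     pattern_list = []
--     for is_alnum, run in groupby(first_token, key=str.isalnum):
--         if is_alnum:
--             pattern_list.append(_ALNUM_TOKEN)
--         else:
--             for ch in run:
--                 if ch in ("'", '"', '\\'):
--                     ch = '\\' + ch
--                 pattern_list.append('[' + ch + ']')
--                 is_bullet_pattern = True
--     return pattern_list, is_bullet_pattern
-- ===== Notes on version B (the rewrite author's own statement) =====
-- stated objective: idiomatic
-- what changed: B splits the string into maximal alnum/non-alnum runs with itertools.groupby and emits one token per alnum run, instead of A's per-character loop that deduplicates by inspecting pattern_list[-1].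
import Mathlib
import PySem

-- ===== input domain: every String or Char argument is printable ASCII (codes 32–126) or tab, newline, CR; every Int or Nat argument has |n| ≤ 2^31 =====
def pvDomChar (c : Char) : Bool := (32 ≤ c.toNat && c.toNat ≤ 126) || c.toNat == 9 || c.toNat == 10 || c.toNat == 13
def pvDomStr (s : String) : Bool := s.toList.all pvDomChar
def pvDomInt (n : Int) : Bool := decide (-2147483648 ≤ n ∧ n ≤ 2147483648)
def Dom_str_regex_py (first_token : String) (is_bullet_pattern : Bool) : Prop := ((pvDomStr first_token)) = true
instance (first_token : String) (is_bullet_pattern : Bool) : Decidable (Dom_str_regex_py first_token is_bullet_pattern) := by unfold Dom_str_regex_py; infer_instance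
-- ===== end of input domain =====

-- B replaces A's per-character loop (which deduplicates alnum tokens by inspecting
-- pattern_list[-1]) with a groupby-style split into maximal alnum/non-alnum runs: idiomatic.


-- ===== PORT A =====
-- the alnum token literal shared by both Python sources
def pvToken : String := "[a-zA-Z0-9가-힣ㅏ-ㅣㄱ-ㅎ\u4e00-\u9fff]+"

-- A's inner `for c in ['\'','\"','\\']: if c == char: char = '\\' + c` (char held as List Char)
def pvEscA (c : Char) : List Char :=
  ['\'', '\"', '\\'].foldl (fun s q => if [q] = s then ['\\', q] else s) [c]

-- A's for-loop over the characters, carrying (pattern_list, is_bullet_pattern)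
def loopA : List Char → List String → Bool → List String × Bool
  | [], pl, b => (pl, b)
  | c :: rest, pl, b =>
    if ¬ (PySem.Chars.isalnum c) then
      loopA rest (pl ++ [String.ofList ('[' :: pvEscA c ++ [']'])]) true
    else
      if pl = [] ∨ pl.getLast? ≠ some pvToken then
        loopA rest (pl ++ [pvToken]) b
      else
        loopA rest pl b

def str_regex_py (first_token : String) (is_bullet_pattern : Bool) : List String × Bool :=
  loopA first_token.toList [] is_bullet_pattern

-- ===== PORT B =====
-- itertools.groupby(s, key=str.isalnum): the maximal runs, each with its key
def groupRuns : List Char → List (Bool × List Char)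
  | [] => []
  | c :: cs =>
    let k := PySem.Chars.isalnum c
    (k, c :: cs.takeWhile (fun x => PySem.Chars.isalnum x == k)) ::
      groupRuns (cs.dropWhile (fun x => PySem.Chars.isalnum x == k))
  termination_by l => l.length
  decreasing_by
    exact Nat.lt_succ_of_le (List.length_dropWhile_le _ cs)

-- B's `'\\' + ch if ch in ("'", '"', '\\') else ch`
def pvEscB (c : Char) : List Char :=
  if c ∈ ['\'', '\"', '\\'] then ['\\', c] else [c]

-- B's loop over the groups (the inner for-loop over a non-alnum run is the foldl)
def loopB : List (Bool × List Char) → List String → Bool → List String × Bool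
  | [], pl, b => (pl, b)
  | (k, run) :: gs, pl, b =>
    if k then
      loopB gs (pl ++ [pvToken]) b
    else
      let st := run.foldl
        (fun (s : List String × Bool) ch =>
          (s.1 ++ [String.ofList ('[' :: pvEscB ch ++ [']'])], true)) (pl, b)
      loopB gs st.1 st.2

def str_regex_py_alt (first_token : String) (is_bullet_pattern : Bool) : List String × Bool :=
  loopB (groupRuns first_token.toList) [] is_bullet_pattern

-- ===== PRECONDITION & SPEC =====
def Spec_str_regex_py (first_token : String) (is_bullet_pattern : Bool) (out : List String × Bool) : Prop := out = str_regex_py_alt first_token is_bullet_pattern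
instance (first_token : String) (is_bullet_pattern : Bool) (out : List String × Bool) : Decidable (Spec_str_regex_py first_token is_bullet_pattern out) := by unfold Spec_str_regex_py; infer_instance

-- ===== CLAIM (what is proved, stated in full; the proofs are below) =====
def Claim_equal_str_regex_py : Prop := ∀ (first_token : String) (is_bullet_pattern : Bool), Dom_str_regex_py first_token is_bullet_pattern → Spec_str_regex_py first_token is_bullet_pattern (str_regex_py first_token is_bullet_pattern)

-- ===== LEMMAS AND PROOFS =====

theorem escA_eq_escB (c : Char) : pvEscA c = pvEscB c := by
  by_cases h1 : c = '\''
  · subst h1; decide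
  · by_cases h2 : c = '\"'
    · subst h2; decide
    · by_cases h3 : c = '\\'
      · subst h3; decide
      · simp [pvEscA, pvEscB, List.foldl, h1, h2, h3, Ne.symm h1, Ne.symm h2, Ne.symm h3]

theorem escPat_ne_token (c : Char) :
    String.ofList ('[' :: pvEscB c ++ [']']) ≠ pvToken := by
  intro h
  have h2 : ('[' :: pvEscB c ++ [']']) = pvToken.toList := by
    simpa using congrArg String.toList h
  have hlen := congrArg List.length h2
  have h24 : pvToken.toList.length = 24 := by decide
  rw [h24] at hlen
  by_cases hc : c ∈ ['\'', '\"', '\\'] <;> simp [pvEscB, hc] at hlen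

-- the last element of pattern_list after a non-alnum run is never the token
theorem last_append_map_ne_token (pl : List String) (l : List Char) (h : l ≠ []) :
    (pl ++ l.map (fun ch => String.ofList ('[' :: pvEscB ch ++ [']']))).getLast?
      ≠ some pvToken := by
  intro hcontra
  rw [List.getLast?_append] at hcontra
  obtain ⟨z, hz⟩ : ∃ z, (l.map (fun ch => String.ofList ('[' :: pvEscB ch ++ [']']))).getLast? = some z := by
    cases hzz : (l.map (fun ch => String.ofList ('[' :: pvEscB ch ++ [']']))).getLast? with
    | none => rw [List.getLast?_eq_none_iff] at hzz; simp [h] at hzz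
    | some z => exact ⟨z, rfl⟩
  rw [hz] at hcontra
  simp at hcontra
  rcases List.mem_map.mp (List.mem_of_getLast? hz) with ⟨ch, _, hch⟩
  exact escPat_ne_token ch (by rw [hch, hcontra])

-- the non-alnum foldl of B just appends the escaped patterns and forces the flag
theorem foldB_eq (run : List Char) (pl : List String) (b : Bool) :
    run.foldl
      (fun (s : List String × Bool) ch =>
        (s.1 ++ [String.ofList ('[' :: pvEscB ch ++ [']'])], true)) (pl, b)
    = (pl ++ run.map (fun ch => String.ofList ('[' :: pvEscB ch ++ [']'])),
       b || !run.isEmpty) := by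
  induction run generalizing pl b with
  | nil => simp
  | cons c cs ih => simp only [List.foldl_cons]; rw [ih]; simp

-- A skips alnum chars while the last pattern is the token
theorem loopA_alnum_skip (run rest : List Char) (pl : List String) (b : Bool)
    (hrun : ∀ x ∈ run, PySem.Chars.isalnum x = true)
    (hlast : pl.getLast? = some pvToken) :
    loopA (run ++ rest) pl b = loopA rest pl b := by
  induction run with
  | nil => rfl
  | cons c cs ih =>
    have hc : PySem.Chars.isalnum c = true := hrun c (by simp)
    have hne : pl ≠ [] := by intro h; simp [h] at hlast
    simp only [List.cons_append, loopA, hc, hlast, hne]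
    simp only [not_true_eq_false, if_false]
    exact ih (fun x hx => hrun x (by simp [hx]))

-- A over a whole alnum run = one token appended (when the last pattern is not the token)
theorem loopA_alnum_run (c : Char) (run rest : List Char) (pl : List String) (b : Bool)
    (hc : PySem.Chars.isalnum c = true)
    (hrun : ∀ x ∈ run, PySem.Chars.isalnum x = true)
    (hlast : pl.getLast? ≠ some pvToken) :
    loopA ((c :: run) ++ rest) pl b = loopA rest (pl ++ [pvToken]) b := by
  simp only [List.cons_append, loopA, hc]
  rw [if_neg (by simp [hc]), if_pos (Or.inr hlast)]
  exact loopA_alnum_skip run rest (pl ++ [pvToken]) b hrun (by simp)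

-- A over a whole non-alnum run = appended bracket patterns, flag forced true
theorem loopA_nonalnum_run (run rest : List Char) (pl : List String) (b : Bool)
    (hrun : ∀ x ∈ run, PySem.Chars.isalnum x = false) :
    loopA (run ++ rest) pl b
      = loopA rest (pl ++ run.map (fun ch => String.ofList ('[' :: pvEscB ch ++ [']'])))
          (b || !run.isEmpty) := by
  induction run generalizing pl b with
  | nil => simp
  | cons c cs ih =>
    have hc : PySem.Chars.isalnum c = false := hrun c (by simp)
    simp only [List.cons_append, loopA, hc, escA_eq_escB]
    rw [if_pos (by simp [hc])]
    rw [ih _ _ (fun x hx => hrun x (by simp [hx]))]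
    simp

theorem head_dropWhile_false {p : Char → Bool} {l : List Char} {y : Char} {ys : List Char}
    (h : l.dropWhile p = y :: ys) : p y = false := by
  induction l with
  | nil => simp [List.dropWhile] at h
  | cons a as ih =>
    by_cases ha : p a
    · exact ih (by simpa [List.dropWhile, ha] using h)
    · simp [List.dropWhile, ha] at h
      simp [← h.1, ha]

-- main: A's char loop equals B's group loop, provided the last pattern is not the
-- token whenever the next char is alnum
theorem loopA_eq_loopB (n : ℕ) : ∀ (chars : List Char), chars.length ≤ n →
    ∀ (pl : List String) (b : Bool),
    (∀ c cs, chars = c :: cs → PySem.Chars.isalnum c = true → pl.getLast? ≠ some pvToken) →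
    loopA chars pl b = loopB (groupRuns chars) pl b := by
  induction n with
  | zero =>
    intro chars hlen pl b _
    have : chars = [] := List.eq_nil_of_length_eq_zero (Nat.le_zero.mp hlen)
    subst this; rw [groupRuns.eq_1]; rfl
  | succ n ih =>
    intro chars hlen pl b hinv
    cases chars with
    | nil => rw [groupRuns.eq_1]; rfl
    | cons c cs =>
      have hsplit := List.takeWhile_append_dropWhile
        (p := fun x => PySem.Chars.isalnum x == PySem.Chars.isalnum c) (l := cs)
      set run := cs.takeWhile (fun x => PySem.Chars.isalnum x == PySem.Chars.isalnum c) with hrdef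
      set rest := cs.dropWhile (fun x => PySem.Chars.isalnum x == PySem.Chars.isalnum c) with hrest
      have hrun : ∀ x ∈ run, PySem.Chars.isalnum x = PySem.Chars.isalnum c := by
        intro x hx
        have := List.mem_takeWhile_imp hx
        simpa using this
      have hrestlen : rest.length ≤ n := by
        have h1 : rest.length ≤ cs.length := List.length_dropWhile_le _ _
        have h2 : (c :: cs).length = cs.length + 1 := by simp
        omega
      have hrestinv : ∀ y ys, rest = y :: ys →
          PySem.Chars.isalnum y = true → (PySem.Chars.isalnum c = false) := by
        intro y ys hy hyal
        have := head_dropWhile_false (hrest ▸ hy)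
        simp [hyal] at this
        cases hca : PySem.Chars.isalnum c
        · rfl
        · simp [hca] at this
      have hgr : groupRuns (c :: cs)
          = (PySem.Chars.isalnum c, c :: run) :: groupRuns rest := by
        rw [groupRuns.eq_2]
      cases hca : PySem.Chars.isalnum c
      · -- non-alnum run
        have hrun' : ∀ x ∈ (c :: run), PySem.Chars.isalnum x = false := by
          intro x hx
          rcases List.mem_cons.mp hx with h | h
          · simpa [h] using hca
          · rw [hrun x h, hca]
        have hA : loopA (c :: cs) pl b
            = loopA rest (pl ++ (c :: run).map (fun ch => String.ofList ('[' :: pvEscB ch ++ [']'])))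
                (b || !(c :: run).isEmpty) := by
          have he : (c :: cs) = (c :: run) ++ rest := by
            simp [hsplit]
          rw [he]
          exact loopA_nonalnum_run _ _ _ _ hrun'
        rw [hA, hgr]
        simp only [loopB, hca, Bool.false_eq_true, if_false, foldB_eq]
        apply ih rest hrestlen
        intro y ys hy hyal
        exact last_append_map_ne_token pl (c :: run) (by simp)
      · -- alnum run
        have hrun' : ∀ x ∈ run, PySem.Chars.isalnum x = true := by
          intro x hx; rw [hrun x hx, hca]
        have hlast : pl.getLast? ≠ some pvToken := hinv c cs rfl hca
        have hA : loopA (c :: cs) pl b = loopA rest (pl ++ [pvToken]) b := by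
          have he : (c :: cs) = (c :: run) ++ rest := by simp [hsplit]
          rw [he]
          exact loopA_alnum_run c run rest pl b hca hrun' hlast
        rw [hA, hgr]
        simp only [loopB, hca, if_true]
        apply ih rest hrestlen
        intro y ys hy hyal
        exfalso
        have := hrestinv y ys hy hyal
        rw [hca] at this; exact absurd this (by decide)

-- ===== VERDICT (by name: the statement is the Claim_ definition above) =====
theorem str_regex_py_spec : Claim_equal_str_regex_py := by
  intro first_token is_bullet_pattern _
  unfold Spec_str_regex_py str_regex_py str_regex_py_alt
  exact loopA_eq_loopB first_token.toList.length first_token.toList le_rfl [] is_bullet_pattern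
    (by intro c cs _ _; simp)
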